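-- pv_equiv track=rewrite | github.com/jiho7407/PS | BaekJoon/Contest/SCUPC_2023/G.py | calcp
-- ===== SOURCE A (Python) =====
-- mod = int(1e9)+7
--
-- def calcp(num):
--     b = 2
--     temp = (num*2) % mod
--     while True:
--         if temp <= b:
--             return [temp, b]
--         b += 1
--         temp = (temp+num) % mod
-- ===== SOURCE B (Python) =====
-- mod = int(1e9)+7
--
-- def calcp(num):
--     # Scan quotients k = (num*b) // mod instead of b itself: for each k the smallest
--     # admissible b is lo = ceil(k*mod/r) (with c = r*lo - k*mod its residue value),
--     # maintained incrementally from divmod(mod, r); return at the first k with c <= lo.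
--     r = num % mod
--     if r <= 1:
--         return [2 * r, 2]
--     q, s = divmod(mod, r)
--     lo = q + (0 if s == 0 else 1)   # ceil(mod / r), the k = 1 candidate
--     c = lo * r - mod                # num*lo % mod for that candidate
--     while c > lo:
--         # step k -> k+1: lo becomes ceil((k+1)*mod / r), c its residue
--         if c >= s:
--             c -= s
--             lo += q
--         else:
--             c += r - s
--             lo += q + 1
--     return [c, lo]
-- ===== Notes on version B (the rewrite author's own statement) =====
-- stated objective: alternative
-- what changed: Instead of stepping b one at a time with a running accumulator, B iterates over the quotient k = num*b // mod and computes in closed form (a ceiling division) the smallest b whose quotient-k interval [ceil(k*mod/r), k*mod//(r-1)] is nonempty, returning at the first such k.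
import Mathlib
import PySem

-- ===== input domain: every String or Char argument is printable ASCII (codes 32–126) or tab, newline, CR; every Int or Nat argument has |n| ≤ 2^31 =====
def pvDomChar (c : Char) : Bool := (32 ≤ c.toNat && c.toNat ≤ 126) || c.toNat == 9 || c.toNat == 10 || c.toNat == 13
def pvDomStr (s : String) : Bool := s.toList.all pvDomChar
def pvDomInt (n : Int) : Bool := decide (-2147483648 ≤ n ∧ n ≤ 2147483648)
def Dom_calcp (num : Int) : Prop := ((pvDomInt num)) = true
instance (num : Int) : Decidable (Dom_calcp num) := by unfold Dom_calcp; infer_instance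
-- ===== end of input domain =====

-- B replaces A's one-step-at-a-time scan of b by a scan over the quotients k = num*b // mod,
-- computing the smallest b admissible for each k in closed form (a ceiling division); objective: alternative.

-- ===== PORT A =====
def pvP : Int := 1000000007

def calcpLoopA (num b temp : Int) : Nat → List Int
  | 0 => []  -- fuel guard only; never reached (the loop stops by b = pvP - 1)
  | fuel+1 =>
    if temp ≤ b then [temp, b]
    else calcpLoopA num (b+1) (PySem.Int.mod (temp+num) pvP) fuel

def calcp (num : Int) : List Int :=
  calcpLoopA num 2 (PySem.Int.mod (num*2) pvP) 1000000007

-- ===== PORT B =====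
def calcpLoopB (r s q lo c : Int) : Nat → List Int
  | 0 => []  -- fuel guard only; never reached (the first good quotient is k ≤ r-1 < pvP)
  | fuel+1 =>
    if c > lo then
      if c ≥ s then calcpLoopB r s q (lo+q) (c-s) fuel
      else calcpLoopB r s q (lo+q+1) (c+r-s) fuel
    else [c, lo]

def calcp_alt (num : Int) : List Int :=
  let r := PySem.Int.mod num pvP
  if r ≤ 1 then [2*r, 2]
  else
    let q := PySem.Int.floordiv pvP r
    let s := PySem.Int.mod pvP r
    let lo := q + (if s = 0 then 0 else 1)
    let c := lo * r - pvP
    calcpLoopB r s q lo c 1000000007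

-- ===== PRECONDITION & SPEC =====
def Spec_calcp (num : Int) (out : List Int) : Prop := out = calcp_alt num
instance (num : Int) (out : List Int) : Decidable (Spec_calcp num out) := by unfold Spec_calcp; infer_instance

-- ===== CLAIM (what is proved, stated in full; the proofs are below) =====
def Claim_equal_calcp : Prop := ∀ (num : Int), Dom_calcp num → Spec_calcp num (calcp num)

-- ===== LEMMAS AND PROOFS =====

-- m num: the value b* A's loop stops at — the least b ≥ 2 with num*b % pvP ≤ b.
theorem mExists (num : Int) : ∃ n : Nat, (num * (2+(n:Int))) % pvP ≤ 2+(n:Int) := by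
  refine ⟨1000000004, ?_⟩
  have h := Int.emod_lt_of_pos (num * (2+((1000000004:Nat):Int))) (b := pvP) (by norm_num [pvP])
  unfold pvP at h ⊢
  push_cast at h ⊢
  omega

def mVal (num : Int) : Int := 2 + ((Nat.find (mExists num) : Nat) : Int)

theorem mVal_two_le (num : Int) : 2 ≤ mVal num := by
  have : (0:Int) ≤ ((Nat.find (mExists num) : Nat) : Int) := Int.natCast_nonneg _
  unfold mVal; omega

theorem mVal_le (num : Int) : mVal num ≤ 1000000006 := by
  have hp : (num * (2+((1000000004:Nat):Int))) % pvP ≤ 2+((1000000004:Nat):Int) := by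
    have h := Int.emod_lt_of_pos (num * (2+((1000000004:Nat):Int))) (b := pvP) (by norm_num [pvP])
    unfold pvP at h ⊢
    push_cast at h ⊢
    omega
  have h := Nat.find_min' (mExists num) hp
  unfold mVal
  omega

theorem mVal_spec (num : Int) : (num * mVal num) % pvP ≤ mVal num := by
  unfold mVal
  exact Nat.find_spec (mExists num)

theorem mVal_min (num : Int) {b : Int} (h2 : 2 ≤ b) (hlt : b < mVal num) :
    ¬ ((num * b) % pvP ≤ b) := by
  have hn : b = 2 + (((b-2).toNat : Nat) : Int) := by omega
  have hlt' : (b-2).toNat < Nat.find (mExists num) := by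
    unfold mVal at hlt; omega
  have h := Nat.find_min (mExists num) hlt'
  rw [hn]; exact h

theorem loopA_step (num b temp : Int) (fuel : Nat) :
    calcpLoopA num b temp (fuel+1) =
      if temp ≤ b then [temp, b]
      else calcpLoopA num (b+1) (PySem.Int.mod (temp+num) pvP) fuel := rfl

-- A's loop, from state (b, num*b % pvP), returns [num*m % pvP, m].
theorem loopA_eq (num : Int) : ∀ (fuel : Nat) (b : Int), 2 ≤ b → b ≤ mVal num →
    mVal num < b + fuel →
    calcpLoopA num b ((num*b) % pvP) fuel = [(num * mVal num) % pvP, mVal num] := by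
  intro fuel
  induction fuel with
  | zero => intro b _ _ h; omega
  | succ fuel ih =>
    intro b hb2 hbm hfuel
    rw [loopA_step]
    by_cases hstop : (num*b) % pvP ≤ b
    · have hbe : b = mVal num := by
        by_contra hne
        exact mVal_min num hb2 (lt_of_le_of_ne hbm hne) hstop
      rw [if_pos hstop, hbe]
    · rw [if_neg hstop]
      have hblt : b < mVal num :=
        lt_of_le_of_ne hbm (by intro h; exact hstop (h ▸ mVal_spec num))
      have hmod : PySem.Int.mod ((num*b) % pvP + num) pvP = (num*(b+1)) % pvP := by
        rw [PySem.Int.mod_eq_emod_of_pos (by norm_num [pvP]), Int.emod_add_emod]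
        congr 1; ring
      rw [hmod]
      exact ih (b+1) (by omega) (by omega) (by omega)

-- ceiling division -((-a)/r) for 0 < r: the bracket characterisation
theorem ceil_le_iff {a r x : Int} (hr : 0 < r) : -((-a) / r) ≤ x ↔ a ≤ x * r := by
  constructor
  · intro h
    have h' : -x ≤ (-a) / r := by omega
    have h'' := (Int.le_ediv_iff_mul_le hr).mp h'
    nlinarith
  · intro h
    have h' : -x * r ≤ -a := by nlinarith
    have h'' := (Int.le_ediv_iff_mul_le hr).mpr h'
    omega

-- the clipped lower end of the quotient-k interval, and the nonemptiness test B uses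
def clipF (r k : Int) : Int := if -((-(k*pvP)) / r) < 2 then 2 else -((-(k*pvP)) / r)

theorem clipF_two_le (r k : Int) : 2 ≤ clipF r k := by
  unfold clipF; split_ifs with h
  · omega
  · omega

theorem clipF_le {r k x : Int} (hr : 0 < r) (h2 : 2 ≤ x) (h : k*pvP ≤ x * r) :
    clipF r k ≤ x := by
  unfold clipF; split_ifs with hh
  · exact h2
  · exact (ceil_le_iff hr).mpr h

theorem clipF_mul_le {r k : Int} (hr : 0 < r) : k*pvP ≤ clipF r k * r := by
  have base : k*pvP ≤ -((-(k*pvP)) / r) * r := (ceil_le_iff hr).mp le_rfl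
  unfold clipF; split_ifs with hh
  · nlinarith
  · exact base

-- existence of a quotient k with nonempty interval (k = r-1 works)
theorem kExists (r : Int) (hr : 2 ≤ r) : ∃ n : Nat, clipF r (1+(n:Int)) * (r-1) ≤ (1+(n:Int))*pvP := by
  refine ⟨(r-2).toNat, ?_⟩
  have hk : 1 + (((r-2).toNat : Nat) : Int) = r - 1 := by omega
  rw [hk]
  have hclip : clipF r (r-1) ≤ pvP := by
    apply clipF_le (by omega) (by norm_num [pvP])
    nlinarith [show (0:Int) ≤ pvP by norm_num [pvP]]
  calc clipF r (r-1) * (r-1) ≤ pvP * (r-1) :=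
        mul_le_mul_of_nonneg_right hclip (by omega)
    _ = (r-1)*pvP := by ring

def kVal (r : Int) (hr : 2 ≤ r) : Int := 1 + ((Nat.find (kExists r hr) : Nat) : Int)

theorem kVal_one_le (r : Int) (hr : 2 ≤ r) : 1 ≤ kVal r hr := by
  have : (0:Int) ≤ ((Nat.find (kExists r hr) : Nat) : Int) := Int.natCast_nonneg _
  unfold kVal; omega

theorem kVal_le (r : Int) (hr : 2 ≤ r) : kVal r hr ≤ r - 1 := by
  have hp : clipF r (1+(((r-2).toNat : Nat) : Int)) * (r-1) ≤ (1+(((r-2).toNat : Nat) : Int))*pvP := by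
    have hk : 1 + (((r-2).toNat : Nat) : Int) = r - 1 := by omega
    rw [hk]
    have hclip : clipF r (r-1) ≤ pvP := by
      apply clipF_le (by omega) (by norm_num [pvP])
      nlinarith [show (0:Int) ≤ pvP by norm_num [pvP]]
    calc clipF r (r-1) * (r-1) ≤ pvP * (r-1) :=
          mul_le_mul_of_nonneg_right hclip (by omega)
      _ = (r-1)*pvP := by ring
  have h := Nat.find_min' (kExists r hr) hp
  unfold kVal
  omega

theorem kVal_spec (r : Int) (hr : 2 ≤ r) : clipF r (kVal r hr) * (r-1) ≤ (kVal r hr)*pvP := by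
  unfold kVal
  exact Nat.find_spec (kExists r hr)

theorem kVal_min (r : Int) (hr : 2 ≤ r) {k : Int} (h1 : 1 ≤ k) (hlt : k < kVal r hr) :
    ¬ (clipF r k * (r-1) ≤ k*pvP) := by
  have hn : k = 1 + (((k-1).toNat : Nat) : Int) := by omega
  have hlt' : (k-1).toNat < Nat.find (kExists r hr) := by
    unfold kVal at hlt; omega
  have h := Nat.find_min (kExists r hr) hlt'
  rw [hn]; exact h

-- the unclipped ceiling is already ≥ 2 (k ≥ 1, r < pvP), so clipF is just the ceiling there
theorem ceil_two_le (r k : Int) (hr : 2 ≤ r) (hrP : r < pvP) (hk : 1 ≤ k) :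
    2 ≤ -((-(k*pvP)) / r) := by
  by_contra h
  have h1 : -((-(k*pvP)) / r) ≤ 1 := by omega
  have h2 := (ceil_le_iff (by omega)).mp h1
  nlinarith [show (0:Int) < pvP by norm_num [pvP]]

theorem clipF_eq_ceil (r k : Int) (hr : 2 ≤ r) (hrP : r < pvP) (hk : 1 ≤ k) :
    clipF r k = -((-(k*pvP)) / r) := by
  have h := ceil_two_le r k hr hrP hk
  unfold clipF
  rw [if_neg (by omega)]

-- x with r*x - k*pvP ∈ [0, r) is exactly the ceiling ceil(k*pvP/r)
theorem ceil_unique {r k x c : Int} (hr0 : 0 < r) (hinv : r*x - k*pvP = c)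
    (h0 : 0 ≤ c) (h1 : c < r) : x = -((-(k*pvP)) / r) := by
  have h2 : -((-(k*pvP)) / r) ≤ x := (ceil_le_iff hr0).mpr (by nlinarith)
  have h3 : ¬ (-((-(k*pvP)) / r) ≤ x - 1) := by
    intro hc
    have := (ceil_le_iff hr0).mp hc
    nlinarith
  omega

theorem loopB_step (r s q lo c : Int) (fuel : Nat) :
    calcpLoopB r s q lo c (fuel+1) =
      if c > lo then
        if c ≥ s then calcpLoopB r s q (lo+q) (c-s) fuel
        else calcpLoopB r s q (lo+q+1) (c+r-s) fuel
      else [c, lo] := rfl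

-- B's loop, from the state (lo, c) of quotient k, returns [r*clip(K) % pvP, clip(K)]
-- for K the first quotient whose interval is nonempty.
theorem loopB_eq (r : Int) (hr : 2 ≤ r) (hrP : r < pvP) :
    ∀ (fuel : Nat) (k lo c : Int), 1 ≤ k → k ≤ kVal r hr → kVal r hr < k + fuel →
    r*lo - k*pvP = c → 0 ≤ c → c < r →
    calcpLoopB r (pvP % r) (pvP / r) lo c fuel
      = [(r * clipF r (kVal r hr)) % pvP, clipF r (kVal r hr)] := by
  intro fuel
  induction fuel with
  | zero => intro k _ _ _ _ h _ _ _; omega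
  | succ fuel ih =>
    intro k lo c hk1 hkK hfuel hinv hc0 hcr
    have hr0 : (0:Int) < r := by omega
    have hP : (0:Int) < pvP := by norm_num [pvP]
    have hlo : lo = -((-(k*pvP)) / r) := ceil_unique hr0 hinv hc0 hcr
    have hclip : clipF r k = lo := by rw [clipF_eq_ceil r k hr hrP hk1, hlo]
    have hgood_iff : (clipF r k * (r-1) ≤ k*pvP) ↔ c ≤ lo := by
      rw [hclip]
      constructor <;> intro h <;> nlinarith
    rw [loopB_step]
    by_cases hexit : c > lo
    · rw [if_pos hexit]
      have hgoodK := kVal_spec r hr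
      have hne : k ≠ kVal r hr := by
        intro he
        exact hexit.not_ge (hgood_iff.mp (he ▸ hgoodK))
      have hklt : k < kVal r hr := lt_of_le_of_ne hkK hne
      have hs0 : 0 ≤ pvP % r := Int.emod_nonneg _ (by omega)
      have hsr : pvP % r < r := Int.emod_lt_of_pos _ hr0
      have hqs : r * (pvP / r) + pvP % r = pvP := Int.mul_ediv_add_emod pvP r
      by_cases hcs : c ≥ pvP % r
      · rw [if_pos hcs]
        exact ih (k+1) (lo + pvP / r) (c - pvP % r) (by omega) (by omega) (by omega)
          (by nlinarith) (by omega) (by omega)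
      · rw [if_neg hcs]
        exact ih (k+1) (lo + pvP / r + 1) (c + r - pvP % r) (by omega) (by omega) (by omega)
          (by nlinarith) (by omega) (by omega)
    · rw [if_neg hexit]
      have hgood : clipF r k * (r-1) ≤ k*pvP := hgood_iff.mpr (by omega)
      have hke : k = kVal r hr := by
        by_contra hne
        exact kVal_min r hr hk1 (lt_of_le_of_ne hkK hne) hgood
      rw [← hke, hclip]
      have hrl : r*lo = c + pvP * k := by nlinarith
      rw [hrl, Int.add_mul_emod_self_left,
        Int.emod_eq_of_lt hc0 (by unfold pvP at hrP ⊢; omega)]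

-- bridge: num*b and (num % pvP)*b agree mod pvP
theorem tEq (num b : Int) : ((num % pvP) * b) % pvP = (num * b) % pvP := by
  conv_lhs => rw [Int.mul_emod]
  conv_rhs => rw [Int.mul_emod]
  rw [Int.emod_emod_of_dvd _ dvd_rfl]

-- the core: B's closed-form b equals A's stopping point
theorem clip_eq_mVal (num : Int) (hr : 2 ≤ num % pvP) :
    clipF (num % pvP) (kVal (num % pvP) hr) = mVal num := by
  set r := num % pvP with hrdef
  set K := kVal r hr with hKdef
  set b0 := clipF r K with hb0def
  set m := mVal num with hmdef
  have hr0 : (0:Int) < r := by omega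
  have hP : (0:Int) < pvP := by norm_num [pvP]
  have hm2 : 2 ≤ m := mVal_two_le num
  have hb02 : 2 ≤ b0 := clipF_two_le r K
  -- (i) b0 satisfies the stopping condition
  have hgK : b0 * (r-1) ≤ K*pvP := kVal_spec r hr
  have hlb : K*pvP ≤ b0 * r := clipF_mul_le hr0
  have hstop : (num * b0) % pvP ≤ b0 := by
    rw [← tEq num b0, ← hrdef]
    have hKd : K ≤ (r*b0)/pvP := by
      rw [Int.le_ediv_iff_mul_le hP]
      nlinarith
    have hdef : (r*b0) % pvP = r*b0 - pvP*((r*b0)/pvP) := by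
      rw [Int.emod_def]
    have : pvP*K ≤ pvP*((r*b0)/pvP) := by
      exact mul_le_mul_of_nonneg_left hKd (by omega)
    nlinarith
  -- (ii) b0 ≤ m via the quotient of m
  have hms : (r * m) % pvP ≤ m := by rw [hrdef, hmdef, tEq num (mVal num)]; exact mVal_spec num
  set kst := (r*m)/pvP with hkstdef
  have hsdef : (r*m) % pvP = r*m - pvP*kst := Int.emod_def _ _
  have hsn : 0 ≤ (r*m) % pvP := Int.emod_nonneg _ (by omega)
  have hk1 : 1 ≤ kst := by nlinarith
  have hkstP : kst*pvP ≤ m*r := by nlinarith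
  have hclipkst : clipF r kst ≤ m := clipF_le hr0 hm2 hkstP
  have hgkst : clipF r kst * (r-1) ≤ kst*pvP := by
    calc clipF r kst * (r-1) ≤ m * (r-1) :=
          mul_le_mul_of_nonneg_right hclipkst (by omega)
      _ ≤ kst*pvP := by nlinarith
  have hKkst : K ≤ kst := by
    by_contra hlt
    exact kVal_min r hr hk1 (by omega) hgkst
  have hb0m : b0 ≤ m := by
    apply clipF_le hr0 hm2
    calc K*pvP ≤ kst*pvP := mul_le_mul_of_nonneg_right hKkst (by omega)
      _ ≤ m*r := hkstP
  -- minimality forces equality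
  by_contra hne
  exact mVal_min num hb02 (lt_of_le_of_ne hb0m hne) hstop

-- ===== VERDICT (by name: the statement is the Claim_ definition above) =====
theorem calcp_spec : Claim_equal_calcp := by
  unfold Claim_equal_calcp
  intro num _
  unfold Spec_calcp
  simp only [calcp, calcp_alt]
  have hP : (0:Int) < pvP := by norm_num [pvP]
  rw [PySem.Int.mod_eq_emod_of_pos (a := num) hP]
  set r := num % pvP with hrdef
  have hr0 : 0 ≤ r := Int.emod_nonneg _ (by omega)
  have hrP : r < pvP := Int.emod_lt_of_pos _ hP
  by_cases hr1 : r ≤ 1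
  · rw [if_pos hr1]
    have htemp : PySem.Int.mod (num*2) pvP = 2*r := by
      rw [PySem.Int.mod_eq_emod_of_pos hP, ← tEq num 2, ← hrdef,
        Int.emod_eq_of_lt (by omega) (by norm_num [pvP]; omega)]
      ring
    rw [htemp, show (1000000007:Nat) = 1000000006+1 from rfl, loopA_step]
    rw [if_pos (by omega)]
  · have hr2 : 2 ≤ r := by omega
    rw [if_neg hr1]
    have hA : calcpLoopA num 2 (PySem.Int.mod (num*2) pvP) 1000000007
        = [(num * mVal num) % pvP, mVal num] := by
      rw [PySem.Int.mod_eq_emod_of_pos hP]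
      exact loopA_eq num 1000000007 2 (by omega) (mVal_two_le num)
        (by have := mVal_le num; omega)
    have hr0' : (0:Int) < r := by omega
    rw [hA, PySem.Int.floordiv_eq_ediv_of_pos hr0', PySem.Int.mod_eq_emod_of_pos hr0']
    have hqs : r * (pvP / r) + pvP % r = pvP := Int.mul_ediv_add_emod pvP r
    have hs0 : 0 ≤ pvP % r := Int.emod_nonneg _ (by omega)
    have hsr : pvP % r < r := Int.emod_lt_of_pos _ hr0'
    have hKle := kVal_le r hr2
    have hK1 := kVal_one_le r hr2
    have hB : ∀ lo c : Int, r*lo - 1*pvP = c → 0 ≤ c → c < r →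
        calcpLoopB r (pvP % r) (pvP / r) lo c 1000000007
          = [(r * clipF r (kVal r hr2)) % pvP, clipF r (kVal r hr2)] := by
      intro lo c h1 h2 h3
      apply loopB_eq r hr2 hrP 1000000007 1 lo c (by omega) (by omega)
        (by unfold pvP at hrP; omega) h1 h2 h3
    by_cases hs : pvP % r = 0
    · rw [if_pos hs]
      rw [hB (pvP / r + 0) ((pvP / r + 0) * r - pvP) (by nlinarith) (by nlinarith) (by nlinarith)]
      rw [clip_eq_mVal num hr2, tEq num (mVal num)]
    · rw [if_neg hs]
      have hspos : 0 < pvP % r := by omega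
      rw [hB (pvP / r + 1) ((pvP / r + 1) * r - pvP) (by nlinarith) (by nlinarith)
        (by nlinarith [hspos])]
      rw [clip_eq_mVal num hr2, tEq num (mVal num)]
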